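-- pv_equiv track=rewrite | github.com/Kororu-lab/RAG | src/ingest/raptor/raptor_level1.py | create_context_text
-- ===== SOURCE A (Python) =====
-- from typing import List, Dict, Any
--
-- def create_context_text(items: List[Dict], max_chars: int = 30000) -> str:
--     """
--     Concatenates summaries with citations. Truncates if too long.
--     Format: [Ref: chunk_id] summary
--     """
--     context_parts = []
--     current_length = 0
--
--     for item in items:
--         # Generate a unique reference ID (e.g., source_file:chunk_id or just chunk_id if processed per file)
--         # Using simple index or ID to save tokens
--         ref_id = item.get("chunk_id", "0")
--         src_lang = item.get("lang", "")
--         summary = item.get("summary", "")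
--
--         entry = f"[Ref: {src_lang}-{ref_id}] {summary}\n"
--
--         if current_length + len(entry) > max_chars:
--             break
--
--         context_parts.append(entry)
--         current_length += len(entry)
--
--     return "\n".join(context_parts)
-- ===== SOURCE B (Python) =====
-- def create_context_text(items, max_chars=30000):
--     """
--     Concatenates summaries with citations. Truncates if too long.
--     Format: [Ref: chunk_id] summary
--     """
--     entries = [
--         "[Ref: {}-{}] {}\n".format(item.get("lang", ""),
--                                    item.get("chunk_id", "0"),
--                                    item.get("summary", ""))
--         for item in items
--     ]
--     # inclusive prefix sums of entry lengths
--     total, cums = 0, []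
--     for e in entries:
--         total += len(e)
--         cums.append(total)
--     # entry lengths are positive, so the prefix sums are increasing and the
--     # count of sums <= max_chars is exactly the length of the admissible prefix
--     k = sum(1 for c in cums if c <= max_chars)
--     return "\n".join(entries[:k])
-- ===== Notes on version B (the rewrite author's own statement) =====
-- stated objective: alternative
-- what changed: Replaces the fused accumulate-and-break loop by a map-then-prefix-select pipeline: build all entry strings, compute inclusive prefix sums of their lengths, count how many sums stay within max_chars, and join that prefix.
import Mathlib
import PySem

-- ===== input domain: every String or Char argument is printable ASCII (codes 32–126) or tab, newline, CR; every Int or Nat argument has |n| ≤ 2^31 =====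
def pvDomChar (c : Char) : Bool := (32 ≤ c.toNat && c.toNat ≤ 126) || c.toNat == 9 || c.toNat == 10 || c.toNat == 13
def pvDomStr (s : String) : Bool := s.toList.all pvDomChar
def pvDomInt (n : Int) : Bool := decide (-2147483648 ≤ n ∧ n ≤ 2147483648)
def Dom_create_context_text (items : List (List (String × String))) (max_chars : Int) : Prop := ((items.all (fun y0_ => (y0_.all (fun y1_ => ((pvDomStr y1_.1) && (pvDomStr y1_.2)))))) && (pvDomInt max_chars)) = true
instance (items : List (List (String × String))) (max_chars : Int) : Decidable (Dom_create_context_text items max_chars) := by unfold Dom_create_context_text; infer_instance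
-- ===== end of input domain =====

-- B replaces A's fused accumulate-and-break loop by a map-then-prefix-select pipeline (alternative decomposition, same cost).

-- ===== PORT A =====
-- the for-loop with break: stops as soon as the running length would exceed max_chars
def pvALoop (max_chars : Int) : List (List (String × String)) → List String → Int → List String
  | [], parts, _ => parts
  | item :: rest, parts, cur =>
      let ref_id := (PySem.Dict.mk item).getD "chunk_id" "0"
      let src_lang := (PySem.Dict.mk item).getD "lang" ""
      let summary := (PySem.Dict.mk item).getD "summary" ""
      let entry := "[Ref: " ++ src_lang ++ "-" ++ ref_id ++ "] " ++ summary ++ "\n"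
      if cur + PySem.Str.len entry > max_chars then parts
      else pvALoop max_chars rest (parts ++ [entry]) (cur + PySem.Str.len entry)

def create_context_text (items : List (List (String × String))) (max_chars : Int) : String :=
  PySem.Str.join "\n" (pvALoop max_chars items [] 0)

-- ===== PORT B =====
def pvEntryB (item : List (String × String)) : String :=
  "[Ref: " ++ (PySem.Dict.mk item).getD "lang" "" ++ "-" ++ (PySem.Dict.mk item).getD "chunk_id" "0"
    ++ "] " ++ (PySem.Dict.mk item).getD "summary" "" ++ "\n"

def create_context_text_alt (items : List (List (String × String))) (max_chars : Int) : String :=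
  let entries := items.map pvEntryB
  let cums := (entries.foldl
      (fun (st : Int × List Int) e => (st.1 + PySem.Str.len e, st.2 ++ [st.1 + PySem.Str.len e]))
      (0, [])).2
  let k := cums.countP (fun c => c ≤ max_chars)
  PySem.Str.join "\n" (entries.take k)

-- ===== PRECONDITION & SPEC =====
def Spec_create_context_text (items : List (List (String × String))) (max_chars : Int) (out : String) : Prop := out = create_context_text_alt items max_chars
instance (items : List (List (String × String))) (max_chars : Int) (out : String) : Decidable (Spec_create_context_text items max_chars out) := by unfold Spec_create_context_text; infer_instance

-- ===== CLAIM (what is proved, stated in full; the proofs are below) =====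
def Claim_equal_create_context_text : Prop := ∀ (items : List (List (String × String))) (max_chars : Int), Dom_create_context_text items max_chars → Spec_create_context_text items max_chars (create_context_text items max_chars)

-- ===== LEMMAS AND PROOFS =====

-- inclusive prefix sums of entry lengths starting from total t
def pvCumsFrom (t : Int) : List String → List Int
  | [] => []
  | e :: rest => (t + PySem.Str.len e) :: pvCumsFrom (t + PySem.Str.len e) rest

theorem pvFoldCums (es : List String) : ∀ (t : Int) (acc : List Int),
    (es.foldl (fun (st : Int × List Int) e => (st.1 + PySem.Str.len e, st.2 ++ [st.1 + PySem.Str.len e]))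
      (t, acc)).2 = acc ++ pvCumsFrom t es := by
  induction es with
  | nil => intro t acc; simp [pvCumsFrom]
  | cons e rest ih =>
      intro t acc
      show (rest.foldl (fun (st : Int × List Int) e => (st.1 + PySem.Str.len e, st.2 ++ [st.1 + PySem.Str.len e]))
        (t + PySem.Str.len e, acc ++ [t + PySem.Str.len e])).2 = _
      rw [ih]
      simp [pvCumsFrom]

theorem pvLenNonneg (s : String) : 0 ≤ PySem.Str.len s := by
  simp [PySem.Str.len_eq]

theorem pvCumsFrom_ge (es : List String) : ∀ (t c : Int), c ∈ pvCumsFrom t es → t ≤ c := by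
  induction es with
  | nil => intro t c h; simp [pvCumsFrom] at h
  | cons e rest ih =>
      intro t c h
      have hl := pvLenNonneg e
      simp [pvCumsFrom] at h
      rcases h with h | h
      · omega
      · have := ih (t + PySem.Str.len e) c h; omega

theorem pvLoopEq (max_chars : Int) (items : List (List (String × String))) :
    ∀ (parts : List String) (cur : Int),
    pvALoop max_chars items parts cur =
      parts ++ (items.map pvEntryB).take
        ((pvCumsFrom cur (items.map pvEntryB)).countP (fun c => decide (c ≤ max_chars))) := by
  induction items with
  | nil => intro parts cur; simp [pvALoop, pvCumsFrom]
  | cons item rest ih =>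
      intro parts cur
      show (if cur + PySem.Str.len (pvEntryB item) > max_chars then parts
            else pvALoop max_chars rest (parts ++ [pvEntryB item]) (cur + PySem.Str.len (pvEntryB item))) = _
      simp only [List.map_cons, pvCumsFrom]
      by_cases h : cur + PySem.Str.len (pvEntryB item) > max_chars
      · rw [if_pos h]
        have hz : ((cur + PySem.Str.len (pvEntryB item)) ::
            pvCumsFrom (cur + PySem.Str.len (pvEntryB item)) (rest.map pvEntryB)).countP
            (fun c => decide (c ≤ max_chars)) = 0 := by
          rw [List.countP_eq_zero]
          intro c hc
          simp only [List.mem_cons] at hc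
          have : ¬ c ≤ max_chars := by
            rcases hc with rfl | hc
            · omega
            · have := pvCumsFrom_ge (rest.map pvEntryB) _ c hc; omega
          simpa using this
        rw [hz]
        simp
      · rw [if_neg h]
        rw [ih (parts ++ [pvEntryB item]) (cur + PySem.Str.len (pvEntryB item))]
        have hp : decide (cur + PySem.Str.len (pvEntryB item) ≤ max_chars) = true :=
          decide_eq_true (not_lt.mp h)
        rw [List.countP_cons, hp]
        simp [List.take_succ_cons, List.append_assoc]

-- ===== VERDICT (by name: the statement is the Claim_ definition above) =====
theorem create_context_text_spec : Claim_equal_create_context_text := by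
  intro items max_chars _
  unfold Spec_create_context_text create_context_text create_context_text_alt
  simp only [pvLoopEq, pvFoldCums]
  simp
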